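-- pv_equiv track=rewrite | github.com/Adnan525/challenges_v2 | hr_maximise_it/main.py | maximise_it
-- ===== SOURCE A (Python) =====
-- def maximise_it(l: list[list[int]], m: int) -> int:
--     possible_remainders = {x**2 % m for x in l[0]}
--
--     for i in range(1, len(l)):
--         new_remainders = set()
--         for p_r in possible_remainders:
--             new_remainders.update(
--                 [(p_r + x**2) % m for x in l[i]]
--             )
--         possible_remainders = new_remainders
--
--     return max(possible_remainders)
-- ===== SOURCE B (Python) =====
-- def maximise_it(l: list[list[int]], m: int) -> int:
--     # top-down DP: best(i, r) = best final remainder starting from row i with partial sum r (mod m)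
--     memo = {}
--
--     def best(i, r):
--         if i == len(l):
--             return r
--         key = (i, r)
--         if key not in memo:
--             memo[key] = max(best(i + 1, (r + x * x) % m) for x in l[i])
--         return memo[key]
--
--     return best(0, 0)
-- ===== Notes on version B (the rewrite author's own statement) =====
-- stated objective: alternative
-- what changed: A runs a forward DP that rebuilds the whole set of reachable remainders row by row and takes max at the end; B never builds a remainder set: it recurses top-down (best(i, r) = max over the row of best(i+1, (r+x*x)%m)) with a memo dict, propagating the maximum directly.
import Mathlib
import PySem

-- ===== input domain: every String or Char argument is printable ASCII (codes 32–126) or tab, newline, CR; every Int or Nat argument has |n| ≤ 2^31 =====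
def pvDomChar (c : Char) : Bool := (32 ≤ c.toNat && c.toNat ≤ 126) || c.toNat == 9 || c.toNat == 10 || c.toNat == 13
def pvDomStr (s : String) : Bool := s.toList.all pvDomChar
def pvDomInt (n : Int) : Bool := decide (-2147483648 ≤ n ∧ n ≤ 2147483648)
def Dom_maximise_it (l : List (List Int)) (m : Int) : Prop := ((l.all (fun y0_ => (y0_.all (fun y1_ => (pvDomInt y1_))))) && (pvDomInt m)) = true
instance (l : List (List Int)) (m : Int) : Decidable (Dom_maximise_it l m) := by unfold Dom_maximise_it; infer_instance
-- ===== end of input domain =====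

-- B replaces A's row-by-row reachable-remainder set DP by a memoized top-down recursion that
-- propagates the maximum directly (no set of remainders is ever built); objective: alternative.

-- ===== PORT A =====
-- l[0] is pyGetD l 0 [] and max(set) is max?.getD 0: both exact under Pre_ (l ≠ [], all rows nonempty).
-- Python iterates the set in hash order; the fold below iterates it in insertion order — the resulting
-- SET (membership) and the final max are order-independent, which is all the return value depends on.
def maximise_it (l : List (List Int)) (m : Int) : Int :=
  let possible0 : PySem.Set Int :=
    PySem.Set.ofList ((PySem.List.pyGetD l 0 []).map (fun x => PySem.Int.mod (x ^ 2) m))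
  let possible :=
    (PySem.List.pyRange 1 (l.length : Int) 1).foldl
      (fun possible_remainders i =>
        possible_remainders.foldl
          (fun new_remainders p_r =>
            PySem.Set.update new_remainders
              ((PySem.List.pyGetD l i []).map (fun x => PySem.Int.mod (p_r + x ^ 2) m)))
          PySem.Set.empty)
      possible0
  (PySem.List.max? possible (fun x => x)).getD 0

-- ===== PORT B =====
-- best(i, r) with memo dict keyed (i, r); the fuel argument is l.length - i, so 'fuel = 0' is
-- exactly Python's 'i == len(l)' guard (a totality device only).  max(...) over the row threads the
-- memo through the generator left to right, exactly as Python evaluates it; Python's max of an empty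
-- row raises ValueError (the 'none' branch below), excluded by Pre_.
-- the inner 'max(... for x in l[i])' generator: scans the row, threading the memo; 'best' is the
-- recursion at one level deeper (the fuel has already been peeled off by maximise_it_altGo)
def maximise_it_altRow (best : Nat → Int → PySem.Dict (Int × Int) Int → Int × PySem.Dict (Int × Int) Int)
    (m : Int) : Nat → Int → List Int → Option Int → PySem.Dict (Int × Int) Int →
      Option Int × PySem.Dict (Int × Int) Int
  | _i, _r, [], acc, memo => (acc, memo)
  | i, r, x :: xs, acc, memo =>
      let vm := best (i + 1) (PySem.Int.mod (r + x * x) m) memo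
      maximise_it_altRow best m i r xs
        (some (match acc with | none => vm.1 | some w => max w vm.1)) vm.2

def maximise_it_altGo (l : List (List Int)) (m : Int) :
    Nat → Nat → Int → PySem.Dict (Int × Int) Int → Int × PySem.Dict (Int × Int) Int
  | 0 => fun _i r memo => (r, memo)
  | fuel + 1 => fun i r memo =>
      match PySem.Dict.get? memo ((i : Int), r) with
      | some v => (v, memo)
      | none =>
          let res := maximise_it_altRow (maximise_it_altGo l m fuel) m i r
            (PySem.List.pyGetD l (i : Int) []) none memo
          match res.1 with
          | none => (0, res.2)
          | some v => (v, PySem.Dict.insert res.2 ((i : Int), r) v)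

def maximise_it_alt (l : List (List Int)) (m : Int) : Int :=
  (maximise_it_altGo l m l.length 0 0 PySem.Dict.empty).1

-- ===== PRECONDITION & SPEC =====
-- A raises exactly on m = 0 (ZeroDivisionError), l = [] (IndexError) and any empty row
-- (max of an empty set, ValueError); Pre_ excludes exactly those raising inputs.
def Pre_maximise_it (l : List (List Int)) (m : Int) : Prop :=
  m ≠ 0 ∧ l ≠ [] ∧ ∀ row ∈ l, row ≠ []
instance (l : List (List Int)) (m : Int) : Decidable (Pre_maximise_it l m) := by
  unfold Pre_maximise_it; infer_instance
def pvWitness_maximise_it : List (List Int) × Int := ([[1], [2]], 3)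

def Spec_maximise_it (l : List (List Int)) (m : Int) (out : Int) : Prop := out = maximise_it_alt l m
instance (l : List (List Int)) (m : Int) (out : Int) : Decidable (Spec_maximise_it l m out) := by unfold Spec_maximise_it; infer_instance

-- ===== CLAIM (what is proved, stated in full; the proofs are below) =====
def Claim_equal_maximise_it : Prop := ∀ (l : List (List Int)) (m : Int), Dom_maximise_it l m → Pre_maximise_it l m → Spec_maximise_it l m (maximise_it l m)

-- ===== LEMMAS AND PROOFS =====

-- running maximum over a list, starting from an optional accumulator (Python's max over a generator)
def pvOptMax (acc : Option Int) (vs : List Int) : Option Int :=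
  vs.foldl (fun a v => some (match a with | none => v | some w => max w v)) acc

-- the pure value B's memoized recursion computes: best final remainder from the remaining rows
def pvSpec (m : Int) : List (List Int) → Int → Int
  | [], r => r
  | row :: rest, r =>
      (pvOptMax none (row.map (fun x => pvSpec m rest (PySem.Int.mod (r + x * x) m)))).getD 0

theorem pvOptMax_some (w : Int) (vs : List Int) :
    pvOptMax (some w) vs = some (vs.foldl max w) := by
  induction vs generalizing w with
  | nil => rfl
  | cons v vs ih => simpa [pvOptMax, List.foldl_cons] using ih (max w v)

theorem pvOptMax_eq_max? (vs : List Int) :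
    pvOptMax none vs = PySem.List.max? vs (fun x => x) := by
  cases vs with
  | nil => rfl
  | cons v vs =>
      rw [PySem.List.max?_id_cons]
      simpa [pvOptMax, List.foldl_cons] using pvOptMax_some v vs

def pvIsMax (xs : List Int) (v : Int) : Prop := v ∈ xs ∧ ∀ y ∈ xs, y ≤ v

theorem pvOptMax_isMax (vs : List Int) (v : Int) (h : pvOptMax none vs = some v) :
    pvIsMax vs v := by
  rw [pvOptMax_eq_max?] at h
  exact ⟨PySem.List.max?_mem h, PySem.List.max?_isMax h⟩

theorem pvOptMax_of_isMax (vs : List Int) (v : Int) (h : pvIsMax vs v) :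
    pvOptMax none vs = some v := by
  rcases hv : pvOptMax none vs with _ | w
  · rw [pvOptMax_eq_max?] at hv
    rw [(PySem.List.max?_eq_none_iff vs _).mp hv] at h
    exact absurd h.1 (List.not_mem_nil)
  · have hw := pvOptMax_isMax vs w hv
    have : v = w := le_antisymm (hw.2 v h.1) (h.2 w hw.1)
    rw [this]

-- two nonempty lists with the same members have the same running maximum
theorem pvOptMax_congr_mem (xs ys : List Int) (hne : xs ≠ [])
    (hmem : ∀ a : Int, a ∈ xs ↔ a ∈ ys) : pvOptMax none xs = pvOptMax none ys := by
  rcases hx : pvOptMax none xs with _ | v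
  · rw [pvOptMax_eq_max?] at hx
    exact absurd ((PySem.List.max?_eq_none_iff xs _).mp hx) hne
  · have h := pvOptMax_isMax xs v hx
    exact (pvOptMax_of_isMax ys v ⟨(hmem v).mp h.1, fun y hy => h.2 y ((hmem y).mpr hy)⟩).symm

-- membership in A's set after one row, as a fold over the previous set
theorem pvMemStepA (m : Int) (S : List Int) (row : List Int) (acc : PySem.Set Int) (t : Int) :
    (t ∈ S.foldl
        (fun new_remainders p_r =>
          PySem.Set.update new_remainders (row.map (fun x => PySem.Int.mod (p_r + x ^ 2) m)))
        acc) ↔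
      t ∈ acc ∨ ∃ p ∈ S, ∃ x ∈ row, t = PySem.Int.mod (p + x ^ 2) m := by
  induction S generalizing acc with
  | nil => simp
  | cons p ps ih =>
      simp only [List.foldl_cons]
      rw [ih]
      rw [PySem.Set.mem_update]
      simp only [List.mem_map, List.mem_cons]
      constructor
      · rintro ((h | ⟨x, hx, hxt⟩) | ⟨q, hq, x, hx, ht⟩)
        · exact Or.inl h
        · exact Or.inr ⟨p, Or.inl rfl, x, hx, hxt.symm⟩
        · exact Or.inr ⟨q, Or.inr hq, x, hx, ht⟩
      · rintro (h | ⟨q, hq | hq, x, hx, ht⟩)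
        · exact Or.inl (Or.inl h)
        · subst hq; exact Or.inl (Or.inr ⟨x, hx, ht.symm⟩)
        · exact Or.inr ⟨q, hq, x, hx, ht⟩

-- S nonempty is preserved by one row step (row nonempty)
theorem pvStepA_ne (m : Int) (S : List Int) (row : List Int) (hS : S ≠ []) (hrow : row ≠ []) :
    (S.foldl
        (fun new_remainders p_r =>
          PySem.Set.update new_remainders (row.map (fun x => PySem.Int.mod (p_r + x ^ 2) m)))
        PySem.Set.empty) ≠ [] := by
  rcases List.exists_mem_of_ne_nil S hS with ⟨p, hp⟩
  rcases List.exists_mem_of_ne_nil row hrow with ⟨x, hx⟩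
  have hmem : PySem.Int.mod (p + x ^ 2) m ∈ _ :=
    (pvMemStepA m S row PySem.Set.empty _).mpr (Or.inr ⟨p, hp, x, hx, rfl⟩)
  exact List.ne_nil_of_mem hmem

-- exchanging A's one-row set step against pvSpec: the maximum over the stepped set of pvSpec rest
-- equals the maximum over the old set of pvSpec (row :: rest)
theorem pvExchange (m : Int) (S row : List Int) (rest : List (List Int))
    (hS : S ≠ []) (hrow : row ≠ []) :
    pvOptMax none
        ((S.foldl
          (fun new_remainders p_r =>
            PySem.Set.update new_remainders (row.map (fun x => PySem.Int.mod (p_r + x ^ 2) m)))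
          PySem.Set.empty).map (pvSpec m rest))
      = pvOptMax none (S.map (pvSpec m (row :: rest))) := by
  set S' := S.foldl
      (fun new_remainders p_r =>
        PySem.Set.update new_remainders (row.map (fun x => PySem.Int.mod (p_r + x ^ 2) m)))
      PySem.Set.empty with hS'
  have hmemS' : ∀ t : Int, t ∈ S' ↔ ∃ p ∈ S, ∃ x ∈ row, t = PySem.Int.mod (p + x ^ 2) m := by
    intro t
    rw [hS', pvMemStepA]
    simp [PySem.Set.empty]
  have hSne' : S' ≠ [] := pvStepA_ne m S row hS hrow
  -- the inner maximum defining pvSpec (row :: rest) p, for each p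
  have hinner : ∀ p : Int, pvIsMax (row.map (fun x => pvSpec m rest (PySem.Int.mod (p + x * x) m)))
      (pvSpec m (row :: rest) p) := by
    intro p
    rcases hv : pvOptMax none (row.map (fun x => pvSpec m rest (PySem.Int.mod (p + x * x) m))) with _ | w
    · rw [pvOptMax_eq_max?] at hv
      have := (PySem.List.max?_eq_none_iff _ _).mp hv
      exact absurd (List.map_eq_nil_iff.mp this) hrow
    · have h := pvOptMax_isMax _ _ hv
      have : pvSpec m (row :: rest) p = w := by
        simp only [pvSpec, hv, Option.getD_some]
      rw [this]
      exact h
  rcases hx : pvOptMax none (S'.map (pvSpec m rest)) with _ | v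
  · rw [pvOptMax_eq_max?] at hx
    have := (PySem.List.max?_eq_none_iff _ _).mp hx
    exact absurd (List.map_eq_nil_iff.mp this) hSne'
  · have hmax := pvOptMax_isMax _ _ hx
    -- (a) every pvSpec (row :: rest) p is ≤ v
    have hub : ∀ p ∈ S, pvSpec m (row :: rest) p ≤ v := by
      intro p hp
      rcases (hinner p).1 with hmem
      rcases List.mem_map.mp hmem with ⟨x, hxr, hval⟩
      have harg : PySem.Int.mod (p + x * x) m ∈ S' := by
        rw [hmemS']
        exact ⟨p, hp, x, hxr, by rw [sq]⟩
      have : pvSpec m rest (PySem.Int.mod (p + x * x) m) ∈ S'.map (pvSpec m rest) :=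
        List.mem_map_of_mem harg
      have := hmax.2 _ this
      omega
    -- (b) v is attained by some p₀ ∈ S
    have hatt : ∃ p ∈ S, pvSpec m (row :: rest) p = v := by
      rcases List.mem_map.mp hmax.1 with ⟨t₀, ht₀, hval⟩
      rcases (hmemS' t₀).mp ht₀ with ⟨p₀, hp₀, x₀, hx₀, rfl⟩
      refine ⟨p₀, hp₀, le_antisymm (hub p₀ hp₀) ?_⟩
      have harg : pvSpec m rest (PySem.Int.mod (p₀ + x₀ * x₀) m)
          ∈ row.map (fun x => pvSpec m rest (PySem.Int.mod (p₀ + x * x) m)) :=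
        List.mem_map_of_mem hx₀
      have := (hinner p₀).2 _ harg
      rw [← sq x₀] at this
      rw [← hval]
      exact this
    -- conclude by IsMax on the right-hand list
    rcases hatt with ⟨p₀, hp₀, hval⟩
    exact (pvOptMax_of_isMax _ v
      ⟨hval ▸ List.mem_map_of_mem hp₀, by
        intro y hy
        rcases List.mem_map.mp hy with ⟨p, hp, rfl⟩
        exact hub p hp⟩).symm

-- A's whole fold equals the maximum over the initial set of pvSpec
theorem pvAval (m : Int) (rows : List (List Int)) (hrows : ∀ row ∈ rows, row ≠ []) (S : List Int)
    (hS : S ≠ []) :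
    (PySem.List.max?
        (rows.foldl
          (fun possible_remainders row =>
            possible_remainders.foldl
              (fun new_remainders p_r =>
                PySem.Set.update new_remainders
                  (row.map (fun x => PySem.Int.mod (p_r + x ^ 2) m)))
              PySem.Set.empty)
          S)
        (fun x => x)).getD 0
      = (pvOptMax none (S.map (pvSpec m rows))).getD 0 := by
  induction rows generalizing S with
  | nil =>
      have hid : S.map (pvSpec m []) = S := by
        rw [show pvSpec m [] = fun r => r from funext (fun r => by simp [pvSpec])]
        exact List.map_id S
      simp only [List.foldl_nil]
      rw [hid, pvOptMax_eq_max?]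
  | cons row rest ih =>
      simp only [List.foldl_cons]
      rw [ih (fun r hr => hrows r (List.mem_cons_of_mem _ hr)) _
        (pvStepA_ne m S row hS (hrows row (List.mem_cons_self ..)))]
      rw [pvExchange m S row rest hS (hrows row (List.mem_cons_self ..))]

-- memo soundness: every memo entry is the pure value
def pvGood (l : List (List Int)) (m : Int) (memo : PySem.Dict (Int × Int) Int) : Prop :=
  ∀ (i : Nat) (r v : Int),
    PySem.Dict.get? memo ((i : Int), r) = some v → v = pvSpec m (l.drop i) r

theorem pvGoSound (l : List (List Int)) (m : Int) :
    ∀ (fuel i : Nat) (r : Int) (memo : PySem.Dict (Int × Int) Int),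
      i + fuel = l.length → pvGood l m memo →
      (maximise_it_altGo l m fuel i r memo).1 = pvSpec m (l.drop i) r ∧
        pvGood l m (maximise_it_altGo l m fuel i r memo).2 := by
  intro fuel
  induction fuel with
  | zero =>
      intro i r memo hlen hgood
      have hnil : l.drop i = [] := List.drop_eq_nil_of_le (by omega)
      rw [maximise_it_altGo, hnil]
      exact ⟨rfl, hgood⟩
  | succ fuel ih =>
      intro i r memo hlen hgood
      have hi : i < l.length := by omega
      have hdrop : l.drop i = l[i] :: l.drop (i + 1) := List.drop_eq_getElem_cons hi
      have hrow : PySem.List.pyGetD l (i : Int) [] = l[i] := PySem.List.pyGetD_ofNat l i [] hi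
      -- the row scan: invariant over the remaining row and accumulator
      have hrowlem : ∀ (row' : List Int) (acc : Option Int) (memo' : PySem.Dict (Int × Int) Int),
          pvGood l m memo' →
          (maximise_it_altRow (maximise_it_altGo l m fuel) m i r row' acc memo').1
              = pvOptMax acc (row'.map (fun x => pvSpec m (l.drop (i + 1)) (PySem.Int.mod (r + x * x) m))) ∧
            pvGood l m (maximise_it_altRow (maximise_it_altGo l m fuel) m i r row' acc memo').2 := by
        intro row'
        induction row' with
        | nil => intro acc memo' hg; exact ⟨rfl, hg⟩
        | cons x xs ihr =>
            intro acc memo' hg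
            simp only [maximise_it_altRow]
            have hcall := ih (i + 1) (PySem.Int.mod (r + x * x) m) memo' (by omega) hg
            rcases ihr
              (some (match acc with
                | none => (maximise_it_altGo l m fuel (i + 1) (PySem.Int.mod (r + x * x) m) memo').1
                | some w => max w (maximise_it_altGo l m fuel (i + 1) (PySem.Int.mod (r + x * x) m) memo').1))
              (maximise_it_altGo l m fuel (i + 1) (PySem.Int.mod (r + x * x) m) memo').2 hcall.2 with ⟨hv, hg2⟩
            refine ⟨?_, hg2⟩
            rw [hv, hcall.1]
            simp [pvOptMax, List.foldl_cons]
      have hspec : pvSpec m (l.drop i) r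
          = (pvOptMax none ((PySem.List.pyGetD l (i : Int) []).map
              (fun x => pvSpec m (l.drop (i + 1)) (PySem.Int.mod (r + x * x) m)))).getD 0 := by
        rw [hdrop, ← hrow]
        simp [pvSpec]
      rw [maximise_it_altGo]
      cases hmg : PySem.Dict.get? memo ((i : Int), r) with
      | some v =>
          simp only [hmg]
          exact ⟨hgood i r v hmg, hgood⟩
      | none =>
          simp only [hmg]
          rcases hrowlem (PySem.List.pyGetD l (i : Int) []) none memo hgood with ⟨hv, hg2⟩
          cases hres : (maximise_it_altRow (maximise_it_altGo l m fuel) m i r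
              (PySem.List.pyGetD l (i : Int) []) none memo).1 with
          | none =>
              rw [hres] at hv
              refine ⟨?_, hg2⟩
              rw [hspec, ← hv]
              rfl
          | some v =>
              rw [hres] at hv
              constructor
              · rw [hspec, ← hv]
                rfl
              · -- the inserted entry carries the pure value
                intro j s w hw
                rw [PySem.Dict.get?_insert] at hw
                by_cases hk : ((j : Int), s) = ((i : Int), r)
                · rw [if_pos hk] at hw
                  have hji : j = i := by
                    have := congrArg Prod.fst hk
                    simpa using this
                  have hsr : s = r := congrArg Prod.snd hk
                  subst hji; subst hsr
                  cases hw
                  rw [hspec, ← hv]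
                  rfl
                · rw [if_neg hk] at hw
                  exact hg2 j s w hw

-- ===== VERDICT (by name: the statement is the Claim_ definition above) =====
theorem maximise_it_spec : Claim_equal_maximise_it := by
  unfold Claim_equal_maximise_it
  intro l m hdom hpre
  obtain ⟨hm, hl, hrows⟩ := hpre
  unfold Spec_maximise_it maximise_it maximise_it_alt
  -- B computes the pure value pvSpec m l 0
  have hB : (maximise_it_altGo l m l.length 0 0 PySem.Dict.empty).1 = pvSpec m l 0 := by
    have := pvGoSound l m l.length 0 0 PySem.Dict.empty (by omega)
      (by intro i r v h; simp [PySem.Dict.empty, PySem.Dict.get?] at h)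
    simpa using this.1
  rw [hB]
  cases l with
  | nil => exact absurd rfl hl
  | cons r0 rows =>
      simp only [PySem.List.pyGetD_zero_cons]
      rw [PySem.List.foldl_pyRange_pyGetD' (r0 :: rows) []
        (fun (poss : PySem.Set Int) (row : List Int) =>
          poss.foldl
            (fun nw p_r => PySem.Set.update nw (row.map (fun x => PySem.Int.mod (p_r + x ^ 2) m)))
            PySem.Set.empty)
        _ (by norm_num : (0:Int) ≤ 1)]
      have hdrop : ((1:Int).toNat) = 1 := rfl
      rw [hdrop]
      simp only [List.drop_succ_cons, List.drop_zero]
      have hr0 : r0 ≠ [] := hrows r0 (List.mem_cons_self ..)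
      have hS0 : PySem.Set.ofList (r0.map (fun x => PySem.Int.mod (x ^ 2) m)) ≠ [] := by
        rcases List.exists_mem_of_ne_nil r0 hr0 with ⟨x, hx⟩
        exact List.ne_nil_of_mem ((PySem.Set.mem_ofList _ _).mpr (List.mem_map_of_mem hx))
      rw [pvAval m rows (fun r hr => hrows r (List.mem_cons_of_mem _ hr)) _ hS0]
      -- finally: the max over the deduplicated first-row remainders equals pvSpec m (r0 :: rows) 0
      have hspec : pvSpec m (r0 :: rows) 0
          = (pvOptMax none (r0.map (fun x => pvSpec m rows (PySem.Int.mod (0 + x * x) m)))).getD 0 := by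
        simp [pvSpec]
      rw [hspec]
      congr 1
      apply pvOptMax_congr_mem
      · intro hmap
        exact hS0 (List.map_eq_nil_iff.mp hmap)
      · intro a
        simp only [List.mem_map]
        constructor
        · rintro ⟨t, ht, rfl⟩
          rcases (PySem.Set.mem_ofList _ _).mp ht with ht'
          rcases List.mem_map.mp ht' with ⟨x, hx, rfl⟩
          exact ⟨x, hx, by rw [zero_add, sq]⟩
        · rintro ⟨x, hx, rfl⟩
          refine ⟨PySem.Int.mod (x ^ 2) m, (PySem.Set.mem_ofList _ _).mpr (List.mem_map_of_mem hx), ?_⟩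
          rw [zero_add, sq]
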